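-- pv_equiv track=rewrite | github.com/nobelleprize/leetcode | 1487-lc.py | solution
-- ===== SOURCE A (Python) =====
-- def solution(names:list):
--     res = []
--     d = dict()
--     for name in names:
--         if name not in d:
--             d[name] = 0
--         else:
--             d[name] += 1
--             temp = name + "(" + str(d[name]) + ")"
--             while temp in d:
--                 d[name] += 1
--                 temp = name + "(" + str(d[name]) + ")"
--             d[temp] = 0
--     for key in d.keys():
--         res.append(key)
--     return res
-- ===== SOURCE B (Python) =====
-- def solution(names: list):
--     taken = set()
--     res = []
--     for name in names:
--         if name not in taken:
--             taken.add(name)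
--             res.append(name)
--         else:
--             k = 1
--             while name + "(" + str(k) + ")" in taken:
--                 k += 1
--             new = name + "(" + str(k) + ")"
--             taken.add(new)
--             res.append(new)
--     return res
-- ===== Notes on version B (the rewrite author's own statement) =====
-- stated objective: simpler
-- what changed: B replaces A's dict of per-name resume counters (and the final pass extracting dict keys) with a plain set of used names plus a result list built directly: on a collision it rescans suffix indices from k=1 instead of resuming from a memoized counter, so no counter state is kept.
import Mathlib
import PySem

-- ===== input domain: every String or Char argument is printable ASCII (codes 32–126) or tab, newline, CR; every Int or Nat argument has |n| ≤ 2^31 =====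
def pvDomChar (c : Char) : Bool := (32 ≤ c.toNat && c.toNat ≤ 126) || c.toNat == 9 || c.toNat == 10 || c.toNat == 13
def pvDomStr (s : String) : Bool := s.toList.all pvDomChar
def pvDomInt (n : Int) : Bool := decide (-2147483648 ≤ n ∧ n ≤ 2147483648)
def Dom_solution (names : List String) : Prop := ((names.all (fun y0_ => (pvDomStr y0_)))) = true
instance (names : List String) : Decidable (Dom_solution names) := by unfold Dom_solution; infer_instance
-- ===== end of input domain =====

-- B replaces A's dict of per-name resume counters with a plain set of used names and a
-- result list built directly, rescanning suffixes from 1 on each collision (objective: simpler).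

-- ===== PORT A =====
-- name + "(" + str(c) + ")"  (shared by both Pythons verbatim)
def mkTemp (name : String) (c : Int) : String := name ++ "(" ++ PySem.Int.toStr c ++ ")"

-- the 'while temp in d:' loop; fuel (d.size + 1) is only a termination guard, proved sufficient below
def solutionWhile (d : PySem.Dict String Int) (name : String) (temp : String) :
    Nat → PySem.Dict String Int × String
  | 0 => (d, temp)
  | fuel + 1 =>
    if d.contains temp then
      let d' := d.modify name 0 (· + 1)
      solutionWhile d' name (mkTemp name (d'.getD name 0)) fuel
    else (d, temp)

def solutionStep (d : PySem.Dict String Int) (name : String) : PySem.Dict String Int :=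
  if !(d.contains name) then d.insert name 0
  else
    let d1 := d.modify name 0 (· + 1)
    let temp := mkTemp name (d1.getD name 0)
    let r := solutionWhile d1 name temp (d1.size + 1)
    r.1.insert r.2 0

def solution (names : List String) : List String :=
  let d := names.foldl solutionStep PySem.Dict.empty
  (PySem.Dict.keys d).foldl (fun res key => res ++ [key]) []

-- ===== PORT B =====
-- the 'while name+"("+str(k)+")" in taken:' scan; fuel (len(taken)+1) is a termination guard
def altFind (taken : PySem.Set String) (name : String) (k : Int) : Nat → String
  | 0 => mkTemp name k
  | fuel + 1 =>
    if taken.contains (mkTemp name k) then altFind taken name (k + 1) fuel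
    else mkTemp name k

def solutionAltStep (st : PySem.Set String × List String) (name : String) :
    PySem.Set String × List String :=
  if !(st.1.contains name) then (st.1.add name, st.2 ++ [name])
  else
    let newName := altFind st.1 name 1 (st.1.length + 1)
    (st.1.add newName, st.2 ++ [newName])

def solution_alt (names : List String) : List String :=
  (names.foldl solutionAltStep (PySem.Set.empty, [])).2

-- ===== PRECONDITION & SPEC =====
def Spec_solution (names : List String) (out : List String) : Prop := out = solution_alt names
instance (names : List String) (out : List String) : Decidable (Spec_solution names out) := by unfold Spec_solution; infer_instance

-- ===== CLAIM (what is proved, stated in full; the proofs are below) =====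
def Claim_equal_solution : Prop := ∀ (names : List String), Dom_solution names → Spec_solution names (solution names)

-- ===== LEMMAS AND PROOFS =====

-- `Nat.toDigitsCore` produces the base-10 digits (via `Nat.digits`) in display order
lemma toDigitsCore_eq_digits : ∀ (f n : Nat) (l : List Char), 0 < n → n < f →
    Nat.toDigitsCore 10 f n l = ((Nat.digits 10 n).map Nat.digitChar).reverse ++ l := by
  intro f
  induction f with
  | zero => intro n l h hf; omega
  | succ f ih =>
    intro n l h hf
    rw [Nat.toDigitsCore]
    rw [Nat.digits_def' (by norm_num : (1:Nat) < 10) h]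
    by_cases h0 : n / 10 = 0
    · simp [h0]
    · simp only [h0, if_false]
      rw [ih (n / 10) _ (Nat.pos_of_ne_zero h0)
        (by have h2 := Nat.div_lt_self h (by norm_num : (1:Nat) < 10); omega)]
      simp

lemma digitChar_inj {a b : Nat} (ha : a < 10) (hb : b < 10) (h : Nat.digitChar a = Nat.digitChar b) :
    a = b := by
  interval_cases a <;> interval_cases b <;> simp_all [Nat.digitChar]

lemma map_digitChar_inj : ∀ (xs ys : List Nat), (∀ x ∈ xs, x < 10) → (∀ y ∈ ys, y < 10) →
    xs.map Nat.digitChar = ys.map Nat.digitChar → xs = ys := by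
  intro xs
  induction xs with
  | nil => intro ys _ _ h; cases ys <;> simp_all
  | cons x xs ih =>
    intro ys hx hy h
    cases ys with
    | nil => simp_all
    | cons y ys =>
      simp only [List.map_cons, List.cons.injEq] at h
      have := digitChar_inj (hx x (by simp)) (hy y (by simp)) h.1
      have := ih ys (fun a ha => hx a (by simp [ha])) (fun a ha => hy a (by simp [ha])) h.2
      simp_all

lemma toChars_inj {a b : Int} (ha : 1 ≤ a) (hb : 1 ≤ b)
    (h : PySem.Int.toChars a = PySem.Int.toChars b) : a = b := by
  unfold PySem.Int.toChars at h
  rw [if_neg (by omega), if_neg (by omega)] at h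
  unfold Nat.toDigits at h
  rw [toDigitsCore_eq_digits _ _ _ (by omega) (by omega),
      toDigitsCore_eq_digits _ _ _ (by omega) (by omega)] at h
  simp only [List.append_nil, List.reverse_inj] at h
  have hd := map_digitChar_inj _ _ (fun x hx => Nat.digits_lt_base (by norm_num) hx)
    (fun y hy => Nat.digits_lt_base (by norm_num) hy) h
  have := Nat.digits_inj_iff.mp hd
  omega

lemma mkTemp_inj {name : String} {a b : Int} (ha : 1 ≤ a) (hb : 1 ≤ b)
    (h : mkTemp name a = mkTemp name b) : a = b := by
  unfold mkTemp at h
  have h2 : (name ++ "(" ++ PySem.Int.toStr a ++ ")").toList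
      = (name ++ "(" ++ PySem.Int.toStr b ++ ")").toList := by rw [h]
  simp only [String.toList_append, PySem.Int.toList_toStr] at h2
  exact toChars_inj ha hb (by simpa using h2)

-- pigeonhole: some suffix index in a window one longer than L is unused
lemma exists_free (L : List String) (name : String) (c : Int) (hc : 1 ≤ c) :
    ∃ i : Nat, i < L.length + 1 ∧ mkTemp name (c + i) ∉ L := by
  by_contra hall
  push Not at hall
  have hsub : (List.range (L.length + 1)).map (fun i : Nat => mkTemp name (c + i)) ⊆ L := by
    intro x hx
    simp only [List.mem_map, List.mem_range] at hx
    obtain ⟨i, hi, rfl⟩ := hx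
    exact hall i hi
  have hnd : ((List.range (L.length + 1)).map (fun i : Nat => mkTemp name (c + i))).Nodup := by
    refine List.Nodup.map_on ?_ (List.nodup_range)
    intro x _ y _ hxy
    have := mkTemp_inj (by omega) (by omega) hxy
    omega
  have := (List.subperm_of_subset hnd hsub).length_le
  simp at this

-- characterisation of A's while loop
lemma solutionWhile_spec : ∀ (fuel : Nat) (d : PySem.Dict String Int) (name : String) (c : Int),
    name ∈ d.keys →
    d.getD name 0 = c →
    (∃ i : Nat, i < fuel ∧ mkTemp name (c + i) ∉ d.keys) →
    ∃ K : Int, c ≤ K ∧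
      (solutionWhile d name (mkTemp name c) fuel).2 = mkTemp name K ∧
      (solutionWhile d name (mkTemp name c) fuel).1.keys = d.keys ∧
      (solutionWhile d name (mkTemp name c) fuel).1.getD name 0 = K ∧
      (∀ x, x ≠ name → (solutionWhile d name (mkTemp name c) fuel).1.getD x 0 = d.getD x 0) ∧
      mkTemp name K ∉ d.keys ∧
      (∀ j : Int, c ≤ j → j < K → mkTemp name j ∈ d.keys) := by
  intro fuel
  induction fuel with
  | zero => rintro d name c hname hc ⟨i, hi, _⟩; omega
  | succ fuel ih =>
    rintro d name c hname hc ⟨i, hi, hfree⟩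
    by_cases hmem : mkTemp name c ∈ d.keys
    · have hcont : d.contains (mkTemp name c) = true := (PySem.Dict.contains_iff_mem_keys d _).mpr hmem
      have hi0 : i ≠ 0 := by rintro rfl; simp at hfree; exact hfree hmem
      set d' := d.modify name 0 (· + 1) with hd'
      have hkeys' : d'.keys = d.keys := by
        rw [hd', PySem.Dict.keys_modify, PySem.Dict.keys_insert_of_contains]
        rw [PySem.Dict.contains_iff_mem_keys]
        exact hname
      have hgd' : d'.getD name 0 = c + 1 := by
        rw [hd', PySem.Dict.getD_modify]; simp [hc]
      obtain ⟨K, hK1, hK2, hK3, hK4, hK5, hK6, hK7⟩ := ih d' name (c + 1) (hkeys' ▸ hname) hgd'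
        ⟨i - 1, by omega, by
          rw [hkeys']
          have : (c + 1) + (↑(i - 1) : Int) = c + i := by omega
          rw [this]; exact hfree⟩
      have hstep : solutionWhile d name (mkTemp name c) (fuel + 1)
          = solutionWhile d' name (mkTemp name (c+1)) fuel := by
        rw [solutionWhile, if_pos hcont]
        show solutionWhile d' name (mkTemp name (d'.getD name 0)) fuel = _
        rw [hgd']
      refine ⟨K, by omega, ?_, ?_, ?_, ?_, ?_, ?_⟩
      · rw [hstep]; exact hK2
      · rw [hstep, hK3, hkeys']
      · rw [hstep]; exact hK4
      · intro x hx
        rw [hstep, hK5 x hx, hd', PySem.Dict.getD_modify, if_neg hx]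
      · rw [← hkeys']; exact hK6
      · intro j hj1 hj2
        rcases eq_or_lt_of_le hj1 with rfl | hlt
        · exact hmem
        · rw [← hkeys']; exact hK7 j (by omega) hj2
    · have hcont : d.contains (mkTemp name c) = false := by
        rw [PySem.Dict.contains_eq_decide_mem_keys]; simpa using hmem
      refine ⟨c, le_refl c, ?_, ?_, ?_, ?_, hmem, by intro j h1 h2; omega⟩ <;>
        rw [solutionWhile, if_neg (by simp [hcont])]
      · exact hc
      · intro x _; rfl

-- characterisation of B's scan
lemma altFind_spec : ∀ (fuel : Nat) (taken : PySem.Set String) (name : String) (k : Int),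
    (∃ i : Nat, i < fuel ∧ mkTemp name (k + i) ∉ taken) →
    ∃ K : Int, k ≤ K ∧ altFind taken name k fuel = mkTemp name K ∧
      mkTemp name K ∉ taken ∧
      (∀ j : Int, k ≤ j → j < K → mkTemp name j ∈ taken) := by
  intro fuel
  induction fuel with
  | zero => rintro taken name k ⟨i, hi, _⟩; omega
  | succ fuel ih =>
    rintro taken name k ⟨i, hi, hfree⟩
    by_cases hmem : mkTemp name k ∈ taken
    · have hi0 : i ≠ 0 := by rintro rfl; simp at hfree; exact hfree hmem
      obtain ⟨K, hK1, hK2, hK3, hK4⟩ := ih taken name (k + 1)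
        ⟨i - 1, by omega, by
          have : k + 1 + (↑(i - 1) : Int) = k + i := by omega
          rw [this]; exact hfree⟩
      refine ⟨K, by omega, ?_, hK3, ?_⟩
      · rw [altFind, if_pos (by simpa [PySem.Set.contains_iff] using hmem)]
        exact hK2
      · intro j hj1 hj2
        rcases eq_or_lt_of_le hj1 with rfl | hlt
        · exact hmem
        · exact hK4 j (by omega) hj2
    · refine ⟨k, le_refl k, ?_, hmem, by intro j h1 h2; omega⟩
      rw [altFind, if_neg (by simpa [PySem.Set.contains_iff] using hmem)]

-- invariant carried through the fold: counters are nonnegative and every suffix up to the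
-- counter of s is already a key
def DInv (d : PySem.Dict String Int) : Prop :=
  ∀ s : String, 0 ≤ d.getD s 0 ∧
    ∀ j : Int, 1 ≤ j → j ≤ d.getD s 0 → mkTemp s j ∈ d.keys

lemma keys_length_eq_size {κ ν : Type} [BEq κ] (d : PySem.Dict κ ν) :
    d.keys.length = d.size := by
  simp [PySem.Dict.keys, PySem.Dict.size]

lemma step_agree (d : PySem.Dict String Int) (st : PySem.Set String × List String)
    (name : String) (h1 : st.1 = d.keys) (h2 : st.2 = d.keys) (hinv : DInv d) :
    (solutionAltStep st name).1 = (solutionStep d name).keys ∧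
    (solutionAltStep st name).2 = (solutionStep d name).keys ∧
    DInv (solutionStep d name) := by
  by_cases hc : d.contains name = true
  · -- collision branch
    have hname : name ∈ d.keys := (PySem.Dict.contains_iff_mem_keys d name).mp hc
    have hcB : st.1.contains name = true := by
      rw [h1]; rw [PySem.Set.contains_iff]; exact hname
    obtain ⟨hc0, hcsuf⟩ := hinv name
    set c := d.getD name 0 with hcdef
    set d1 := d.modify name 0 (· + 1) with hd1
    have hk1 : d1.keys = d.keys := by
      rw [hd1, PySem.Dict.keys_modify, PySem.Dict.keys_insert_of_contains]
      rw [PySem.Dict.contains_iff_mem_keys]; exact hname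
    have hg1 : d1.getD name 0 = c + 1 := by
      rw [hd1, PySem.Dict.getD_modify]; simp only [← hcdef]; simp
    have hgx : ∀ x, x ≠ name → d1.getD x 0 = d.getD x 0 := by
      intro x hx; rw [hd1, PySem.Dict.getD_modify, if_neg hx]
    -- A's while loop
    obtain ⟨iA, hiA, hfA⟩ := exists_free d1.keys name (c + 1) (by omega)
    have hsz : d1.keys.length + 1 = d1.size + 1 := by rw [keys_length_eq_size]
    obtain ⟨KA, hKA1, hKA2, hKA3, hKA4, hKA5, hKA6, hKA7⟩ :=
      solutionWhile_spec (d1.size + 1) d1 name (c + 1) (hk1 ▸ hname) hg1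
        ⟨iA, by omega, hfA⟩
    -- B's scan
    obtain ⟨iB, hiB, hfB⟩ := exists_free st.1 name 1 (by omega)
    obtain ⟨KB, hKB1, hKB2, hKB3, hKB4⟩ :=
      altFind_spec (st.1.length + 1) st.1 name 1 ⟨iB, by omega, hfB⟩
    -- the two least indices coincide
    have hKeq : KB = KA := by
      rcases lt_trichotomy KB KA with hlt | heq | hgt
      · exfalso
        rcases le_or_gt KB c with hle | hgt2
        · exact (h1 ▸ hKB3) (hcsuf KB (by omega) hle)
        · exact (h1 ▸ hKB3) (hk1 ▸ hKA7 KB (by omega) hlt)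
      · exact heq
      · exfalso
        exact (hk1 ▸ hKA6) (h1 ▸ hKB4 KA (by omega) hgt)
    -- reduce both steps
    set r := solutionWhile d1 name (mkTemp name (c + 1)) (d1.size + 1) with hr
    have hA : solutionStep d name = r.1.insert r.2 0 := by
      simp only [solutionStep, hc, ← hd1, ← hr, hg1]; simp
    have hB : solutionAltStep st name =
        (st.1.add (mkTemp name KB), st.2 ++ [mkTemp name KB]) := by
      simp only [solutionAltStep, hcB, hKB2]; simp
    have hfreshA : r.1.contains r.2 = false := by
      rw [hKA2, PySem.Dict.contains_eq_decide_mem_keys]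
      simp only [decide_eq_false_iff_not]
      rw [hKA3, hk1]
      exact hk1 ▸ hKA6
    have hkeysA : (solutionStep d name).keys = d.keys ++ [mkTemp name KA] := by
      rw [hA, hKA2, PySem.Dict.keys_insert_of_not_contains _ _ (hKA2 ▸ hfreshA), hKA3, hk1]
    have hmemB : mkTemp name KB ∉ st.1 := hKB3
    refine ⟨?_, ?_, ?_⟩
    · rw [hB, hkeysA]
      show st.1.add (mkTemp name KB) = d.keys ++ [mkTemp name KA]
      rw [PySem.Set.add]
      rw [if_neg (by simp only [PySem.Set.contains_iff]; exact hmemB)]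
      rw [h1, hKeq]
    · rw [hB, hkeysA]
      show st.2 ++ [mkTemp name KB] = d.keys ++ [mkTemp name KA]
      rw [h2, hKeq]
    · intro s
      rw [hA]
      have hgd2 : ∀ x, (r.1.insert r.2 0).getD x 0
          = if x = mkTemp name KA then 0 else r.1.getD x 0 := by
        intro x; rw [hKA2, PySem.Dict.getD_insert]
      have hkeys2 : (r.1.insert r.2 0).keys = d.keys ++ [mkTemp name KA] := by
        rw [← hA]; exact hkeysA
      rw [hgd2, hkeys2]
      by_cases hs1 : s = mkTemp name KA
      · subst hs1
        refine ⟨by simp, ?_⟩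
        intro j hj1 hj2
        simp at hj2
        omega
      · rw [if_neg hs1]
        by_cases hs2 : s = name
        · subst hs2
          rw [hKA4]
          refine ⟨by omega, ?_⟩
          intro j hj1 hj2
          rcases lt_or_eq_of_le hj2 with hlt | heq2
          · rcases le_or_gt j c with hle | hgt2
            · exact List.mem_append_left _ (hcsuf j hj1 hle)
            · exact List.mem_append_left _ (hk1 ▸ hKA7 j (by omega) hlt)
          · subst heq2; exact List.mem_append_right _ (by simp)
        · rw [hKA5 s hs2, hgx s hs2]
          obtain ⟨ha, hb⟩ := hinv s
          exact ⟨ha, fun j hj1 hj2 => List.mem_append_left _ (hb j hj1 hj2)⟩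
  · -- fresh-name branch
    have hc' : d.contains name = false := by simpa using hc
    have hnames : name ∉ d.keys := by
      rw [← PySem.Dict.contains_iff_mem_keys, hc']; simp
    have hcB : st.1.contains name = false := by
      rw [← Bool.not_eq_true, PySem.Set.contains_iff, h1]; exact hnames
    have hA : solutionStep d name = d.insert name 0 := by
      simp only [solutionStep, hc']; simp
    have hB : solutionAltStep st name = (st.1.add name, st.2 ++ [name]) := by
      simp only [solutionAltStep, hcB]; simp
    have hkeysA : (solutionStep d name).keys = d.keys ++ [name] := by
      rw [hA, PySem.Dict.keys_insert_of_not_contains _ _ hc']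
    refine ⟨?_, ?_, ?_⟩
    · rw [hB, hkeysA]
      show st.1.add name = d.keys ++ [name]
      rw [PySem.Set.add, if_neg (by rw [hcB]; simp), h1]
    · rw [hB, hkeysA]; show st.2 ++ [name] = d.keys ++ [name]; rw [h2]
    · intro s
      rw [hA, PySem.Dict.keys_insert_of_not_contains _ _ hc', PySem.Dict.getD_insert]
      by_cases hs : s = name
      · rw [if_pos hs]
        exact ⟨le_refl 0, by intro j hj1 hj2; omega⟩
      · rw [if_neg hs]
        obtain ⟨ha, hb⟩ := hinv s
        exact ⟨ha, fun j hj1 hj2 => List.mem_append_left _ (hb j hj1 hj2)⟩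

lemma fold_agree : ∀ (names : List String) (d : PySem.Dict String Int)
    (st : PySem.Set String × List String),
    st.1 = d.keys → st.2 = d.keys → DInv d →
    (names.foldl solutionAltStep st).2 = (names.foldl solutionStep d).keys := by
  intro names
  induction names with
  | nil => intro d st _ h2 _; simpa using h2
  | cons name rest ih =>
    intro d st h1 h2 hinv
    obtain ⟨g1, g2, g3⟩ := step_agree d st name h1 h2 hinv
    simpa using ih (solutionStep d name) (solutionAltStep st name) g1 g2 g3

-- ===== VERDICT (by name: the statement is the Claim_ definition above) =====
theorem solution_spec : Claim_equal_solution := by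
  intro names _
  unfold Spec_solution solution solution_alt
  rw [PySem.List.foldl_append_singleton]
  simp only [List.nil_append]
  exact (fold_agree names PySem.Dict.empty (PySem.Set.empty, []) (by simp) (by simp)
    (by intro s; refine ⟨by simp, ?_⟩; intro j hj hj2; simp [PySem.Dict.getD_empty] at hj2; omega)).symm
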